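-- pv_equiv track=rewrite | github.com/leeroybrun/edison | src/edison/core/composition/output/managed_blocks.py | _marker_on_own_line
-- ===== SOURCE A (Python) =====
-- def _marker_on_own_line(text: str, idx: int, marker_len: int) -> bool:
--     left = idx - 1
--     while left >= 0 and text[left] != "\n":
--         if text[left] not in (" ", "\t", "\r"):
--             return False
--         left -= 1
--
--     right = idx + marker_len
--     while right < len(text) and text[right] != "\n":
--         if text[right] not in (" ", "\t", "\r"):
--             return False
--         right += 1
--
--     return True
-- ===== SOURCE B (Python) =====
-- def _marker_on_own_line(text: str, idx: int, marker_len: int) -> bool: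
--     # Validate the marker span: a position outside the text, or a span end before
--     # the start of it, would otherwise be read through Python's silent
--     # negative-index/slice wraparound.
--     if idx < 0 or idx > len(text) or idx + marker_len < 0:
--         raise ValueError("marker span out of range")
--     # Find the extent of the line containing the marker, then validate the two
--     # surrounding slices in separate passes.
--     line_start = text.rfind("\n", 0, idx) + 1
--     line_end = text.find("\n", idx + marker_len)
--     if line_end == -1:
--         line_end = len(text)
--     before = text[line_start:idx]
--     after = text[idx + marker_len:line_end]
--     return all(c in " \t\r" for c in before) and all(c in " \t\r" for c in after)
-- ===== Notes on version B (the rewrite author's own statement) =====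
-- stated objective: simpler
-- what changed: B validates the marker span (raising ValueError on out-of-range positions instead of wrapped scanning), locates the line extent with rfind/find library calls, and then validates the two slices with all(...) membership passes, instead of A's two manual index-walking loops that interleave boundary detection with the whitespace test.
-- outside the precondition, e.g. on _marker_on_own_line('ab', -1, 5): A returns True, B raises ValueError; on _marker_on_own_line('ab', 1, -100): A returns False, B raises ValueError
import Mathlib
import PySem

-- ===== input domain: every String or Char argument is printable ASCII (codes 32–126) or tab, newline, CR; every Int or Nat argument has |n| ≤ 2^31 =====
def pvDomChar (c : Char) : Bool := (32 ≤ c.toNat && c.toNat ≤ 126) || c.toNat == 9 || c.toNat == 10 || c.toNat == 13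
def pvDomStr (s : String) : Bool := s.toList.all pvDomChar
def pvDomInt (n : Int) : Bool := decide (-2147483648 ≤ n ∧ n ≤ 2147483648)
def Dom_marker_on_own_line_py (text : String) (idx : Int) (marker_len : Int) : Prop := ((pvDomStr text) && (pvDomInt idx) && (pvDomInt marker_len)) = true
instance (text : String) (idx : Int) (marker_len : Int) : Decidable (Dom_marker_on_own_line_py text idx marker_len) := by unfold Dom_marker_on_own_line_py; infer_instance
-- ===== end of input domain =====

-- B validates the marker span (raising ValueError outside Pre_, where A wraps or raises), finds the
-- line extent with rfind/find, then checks the two slices in separate whitespace passes, instead of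
-- A's interleaved manual scanning loops (simpler decomposition).


-- ===== PORT A =====
def pvAWs (c : Char) : Bool := c = ' ' || c = '\t' || c = '\r'

-- 'left = idx - 1; while left >= 0 and text[left] != "\n": …; left -= 1'
-- (pyGet? = none is Python's IndexError; excluded by Pre_, the branch returns a dummy)
def pvALeft (cs : List Char) (left : Int) : Bool :=
  if _h : 0 ≤ left then
    match PySem.List.pyGet? cs left with
    | none => true
    | some c =>
      if c = '\n' then true
      else if pvAWs c then pvALeft cs (left - 1) else false
  else true
termination_by (left + 1).toNat
decreasing_by omega

-- 'right = idx + marker_len; while right < len(text) and text[right] != "\n": …; right += 1'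
def pvARight (cs : List Char) (right : Int) : Bool :=
  if _h : right < (cs.length : Int) then
    match PySem.List.pyGet? cs right with
    | none => true
    | some c =>
      if c = '\n' then true
      else if pvAWs c then pvARight cs (right + 1) else false
  else true
termination_by ((cs.length : Int) - right).toNat
decreasing_by omega

def marker_on_own_line_py (text : String) (idx : Int) (marker_len : Int) : Bool :=
  pvALeft text.toList (idx - 1) && pvARight text.toList (idx + marker_len)

-- ===== PORT B =====
def pvBAllWs (cs : List Char) : Bool := cs.all (fun c => c = ' ' || c = '\t' || c = '\r')

-- the ValueError guard: Python raises there (inputs outside Pre_); the port returns a dummy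
def marker_on_own_line_py_alt (text : String) (idx : Int) (marker_len : Int) : Bool :=
  if idx < 0 ∨ idx > (text.toList.length : Int) ∨ idx + marker_len < 0 then false else
  let cs := text.toList
  let lineStart := PySem.Chars.rfindFrom cs ['\n'] 0 (some idx) + 1
  let f := PySem.Chars.findFrom cs ['\n'] (idx + marker_len) none
  let lineEnd := if f = -1 then (cs.length : Int) else f
  let before := PySem.List.slice cs (some lineStart) (some idx)
  let after := PySem.List.slice cs (some (idx + marker_len)) (some lineEnd)
  pvBAllWs before && pvBAllWs after

-- ===== PRECONDITION & SPEC =====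
-- Pre_ excludes the inputs with idx > len(text), where A raises IndexError, and those with
-- idx < 0 or idx + marker_len < 0, where A's value (left scan silently skipped, right scan
-- reading via negative-index wraparound) is an accident of Python indexing; B raises
-- ValueError on all of these.
def Pre_marker_on_own_line_py (text : String) (idx : Int) (marker_len : Int) : Prop :=
  0 ≤ idx ∧ idx ≤ (text.toList.length : Int) ∧ 0 ≤ idx + marker_len
instance (text : String) (idx : Int) (marker_len : Int) : Decidable (Pre_marker_on_own_line_py text idx marker_len) := by unfold Pre_marker_on_own_line_py; infer_instance

def pvWitness_marker_on_own_line_py : String × Int × Int := ("  <<B>> x\nfoo", 2, 5)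

def Spec_marker_on_own_line_py (text : String) (idx : Int) (marker_len : Int) (out : Bool) : Prop := out = marker_on_own_line_py_alt text idx marker_len
instance (text : String) (idx : Int) (marker_len : Int) (out : Bool) : Decidable (Spec_marker_on_own_line_py text idx marker_len out) := by unfold Spec_marker_on_own_line_py; infer_instance

-- ===== CLAIM (what is proved, stated in full; the proofs are below) =====
def Claim_equal_marker_on_own_line_py : Prop := ∀ (text : String) (idx : Int) (marker_len : Int), Dom_marker_on_own_line_py text idx marker_len → Pre_marker_on_own_line_py text idx marker_len → Spec_marker_on_own_line_py text idx marker_len (marker_on_own_line_py text idx marker_len)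

-- ===== LEMMAS AND PROOFS =====

-- last index ≤ k holding '\n', as a simple recursion (mirror of Chars.rfind.go for sub = ['\n'])
def pvLastNL (s : List Char) : Nat → Int
  | 0 => if s[0]? = some '\n' then 0 else -1
  | (j+1) => if s[j+1]? = some '\n' then ((j+1 : Nat) : Int) else pvLastNL s j

theorem pvSingleton_isPrefixOf (c : Char) (l : List Char) :
    [c].isPrefixOf l = (l[0]? == some c) := by
  cases l with
  | nil => simp [List.isPrefixOf]
  | cons a t => simp [List.isPrefixOf, eq_comm]

theorem pvGo_eq_lastNL (s : List Char) (k : Nat) :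
    PySem.Chars.rfind.go s ['\n'] k = pvLastNL s k := by
  induction k with
  | zero =>
      simp [PySem.Chars.rfind.go, pvLastNL, pvSingleton_isPrefixOf]
  | succ j ih =>
      rw [show PySem.Chars.rfind.go s ['\n'] (j+1)
            = if ['\n'].isPrefixOf (s.drop (j+1)) then ((j+1 : Nat) : Int)
              else PySem.Chars.rfind.go s ['\n'] j from rfl]
      simp only [pvLastNL, pvSingleton_isPrefixOf, ih, List.getElem?_drop, Nat.add_zero]
      by_cases h : s[j+1]? = some '\n' <;> simp [h]

theorem pvLastNL_bounds (s : List Char) (k : Nat) :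
    -1 ≤ pvLastNL s k ∧ pvLastNL s k ≤ (k : Int) := by
  induction k with
  | zero => unfold pvLastNL; split <;> omega
  | succ j ih => unfold pvLastNL; split <;> omega

-- appending a non-newline char does not change pvLastNL at indices ≤ t.length
theorem pvLastNL_append (t : List Char) (a : Char) (ha : a ≠ '\n') :
    ∀ j, j ≤ t.length → pvLastNL (t ++ [a]) j = pvLastNL t j := by
  intro j hj
  induction j with
  | zero =>
      unfold pvLastNL
      by_cases h : 0 < t.length
      · rw [List.getElem?_append_left h]
      · have ht : t = [] := List.eq_nil_of_length_eq_zero (by omega)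
        subst ht; simp [ha]
  | succ j ih =>
      unfold pvLastNL
      by_cases h : j + 1 < t.length
      · rw [List.getElem?_append_left h, ih (by omega)]
      · have h1 : j + 1 = t.length := by omega
        have e1 : (t ++ [a])[j+1]? = some a := by
          rw [List.getElem?_append_right (by omega)]; simp [h1]
        have e2 : t[j+1]? = none := by simp [h1]
        rw [e1, e2]
        simp [ha, ih (by omega)]

-- the drop-after-last-newline characterisation
theorem pvLastNL_lt_length (t : List Char) : pvLastNL t t.length < (t.length : Int) := by
  cases ht : t.length with
  | zero => simp [pvLastNL, List.getElem?_eq_none (by omega : t.length ≤ 0)]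
  | succ m =>
      unfold pvLastNL
      rw [List.getElem?_eq_none (by omega : t.length ≤ m + 1)]
      have := pvLastNL_bounds t m
      simp; omega

theorem pvLastNL_drop (t : List Char) :
    t.drop ((pvLastNL t t.length + 1).toNat) = (t.reverse.takeWhile (· ≠ '\n')).reverse := by
  induction t using List.reverseRecOn with
  | nil => simp [pvLastNL]
  | append_singleton t a ih =>
      have hlen : (t ++ [a]).length = t.length + 1 := by simp
      rw [hlen]
      have step : pvLastNL (t ++ [a]) (t.length + 1) = pvLastNL (t ++ [a]) t.length := by
        rw [show pvLastNL (t ++ [a]) (t.length + 1)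
              = if (t ++ [a])[t.length + 1]? = some '\n' then ((t.length + 1 : Nat) : Int)
                else pvLastNL (t ++ [a]) t.length from rfl]
        rw [List.getElem?_eq_none (by simp)]
        simp
      rw [step]
      by_cases hA : a = '\n'
      · have hv : pvLastNL (t ++ [a]) t.length = (t.length : Int) := by
          have e1 : (t ++ [a])[t.length]? = some a := by
            rw [List.getElem?_append_right (by omega)]; simp
          cases hL : t.length with
          | zero =>
              rw [show pvLastNL (t ++ [a]) 0
                    = if (t ++ [a])[0]? = some '\n' then (0 : Int) else -1 from rfl]
              rw [hL] at e1; rw [e1]; simp [hA]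
          | succ m =>
              rw [show pvLastNL (t ++ [a]) (m + 1)
                    = if (t ++ [a])[m + 1]? = some '\n' then ((m + 1 : Nat) : Int)
                      else pvLastNL (t ++ [a]) m from rfl]
              rw [hL] at e1; rw [e1]; simp [hA]
        rw [hv, hA]
        simp
      · rw [pvLastNL_append t a hA t.length (le_refl _)]
        have hb := pvLastNL_bounds t t.length
        have hlt := pvLastNL_lt_length t
        rw [List.drop_append_of_le_length (by omega)]
        rw [ih]
        simp [hA]

-- A's left loop computes 'the tail of the previous line is all whitespace'
theorem pvSingleton_prefix_iff (a : Char) (l : List Char) : [a] <+: l ↔ l[0]? = some a := by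
  constructor
  · rintro ⟨t, rfl⟩; simp
  · intro h
    cases l with
    | nil => simp at h
    | cons b t => simp at h; exact ⟨t, by simp [h]⟩

theorem pvALeft_spec (cs : List Char) : ∀ (i : Nat), i ≤ cs.length →
    pvALeft cs ((i : Int) - 1) = ((cs.take i).reverse.takeWhile (· ≠ '\n')).all pvAWs := by
  intro i
  induction i with
  | zero => intro _; rw [pvALeft]; simp
  | succ i ih =>
      intro hi
      have hlt : i < cs.length := by omega
      have harg : ((i + 1 : Nat) : Int) - 1 = (i : Int) := by push_cast; ring
      rw [harg, pvALeft]
      rw [dif_pos (by exact_mod_cast Int.natCast_nonneg i)]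
      simp only [PySem.List.pyGet?_natCast, List.getElem?_eq_getElem hlt]
      rw [List.take_add_one, List.getElem?_eq_getElem hlt]
      simp only [Option.toList_some, List.reverse_append, List.reverse_cons, List.reverse_nil,
        List.nil_append, List.singleton_append, List.takeWhile_cons]
      by_cases hc : cs[i] = '\n'
      · simp [hc]
      · by_cases hw : pvAWs cs[i]
        · simp [hc, hw, ih (by omega)]
        · simp [hc, hw]

-- A's right loop computes 'the rest of the line is all whitespace'
theorem pvARight_spec_aux (cs : List Char) : ∀ (d k : Nat), cs.length - k ≤ d →
    pvARight cs (k : Int) = ((cs.drop k).takeWhile (· ≠ '\n')).all pvAWs := by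
  intro d
  induction d with
  | zero =>
      intro k hk
      rw [pvARight, dif_neg (by omega), List.drop_eq_nil_of_le (by omega)]
      simp
  | succ d ih =>
      intro k hk
      by_cases hlt : k < cs.length
      · rw [pvARight, dif_pos (by exact_mod_cast hlt)]
        simp only [PySem.List.pyGet?_natCast, List.getElem?_eq_getElem hlt]
        rw [List.drop_eq_getElem_cons hlt]
        simp only [List.takeWhile_cons]
        by_cases hc : cs[k] = '\n'
        · simp [hc]
        · by_cases hw : pvAWs cs[k]
          · have harg : (k : Int) + 1 = ((k + 1 : Nat) : Int) := by push_cast; ring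
            rw [if_neg (by simp [hc]), if_pos hw]
            rw [harg, ih (k + 1) (by omega)]
            simp [hc, hw]
          · simp [hc, hw]
      · rw [pvARight, dif_neg (by omega), List.drop_eq_nil_of_le (by omega)]
        simp

theorem pvARight_spec (cs : List Char) (k : Nat) :
    pvARight cs (k : Int) = ((cs.drop k).takeWhile (· ≠ '\n')).all pvAWs :=
  pvARight_spec_aux cs (cs.length - k) k (le_refl _)

-- a take that stops exactly before the first failure of p is a takeWhile
theorem pvTake_eq_takeWhile (p : Char → Bool) :
    ∀ (t : List Char) (j : Nat), (∀ jj, jj < j → ∀ c, t[jj]? = some c → p c = true) →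
      (∀ c, t[j]? = some c → p c = false) →
      t.take j = t.takeWhile p := by
  intro t
  induction t with
  | nil => simp
  | cons a t ih =>
      intro j h1 h2
      cases j with
      | zero =>
          have := h2 a (by simp)
          simp [this]
      | succ j =>
          have hpa : p a = true := h1 0 (by omega) a (by simp)
          rw [List.take_succ_cons, List.takeWhile_cons, if_pos hpa]
          rw [ih j (fun jj hjj c hc => h1 (jj + 1) (by omega) c (by simpa using hc))
                (fun c hc => h2 c (by simpa using hc))]

theorem pvRfindFrom_eval (cs : List Char) (idx : Int) (h1 : 0 ≤ idx) (h3 : idx ≤ (cs.length : Int)) :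
    PySem.Chars.rfindFrom cs ['\n'] 0 (some idx)
      = (if PySem.Chars.rfind (cs.take idx.toNat) ['\n'] = -1 then -1
         else PySem.Chars.rfind (cs.take idx.toNat) ['\n']) := by
  unfold PySem.Chars.rfindFrom
  simp only []
  rw [show (if (cs.length:Int) < idx then (cs.length:Int)
        else if idx < 0 then if idx + (cs.length:Int) < 0 then 0 else idx + (cs.length:Int)
        else idx) = idx from by rw [if_neg (by omega), if_neg (by omega)]]
  simp
  exact fun hneg => absurd hneg (by omega)

theorem pvRfind_eq_lastNL (t : List Char) :
    PySem.Chars.rfind t ['\n'] = pvLastNL t t.length := by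
  unfold PySem.Chars.rfind
  exact pvGo_eq_lastNL t t.length

-- B's 'before' slice is exactly the tail of the previous line
theorem pvBefore_eq (cs : List Char) (i : Nat) (hin : i ≤ cs.length) :
    PySem.List.slice cs (some (PySem.Chars.rfindFrom cs ['\n'] 0 (some (i : Int)) + 1)) (some (i : Int))
      = ((cs.take i).reverse.takeWhile (· ≠ '\n')).reverse := by
  rw [pvRfindFrom_eval cs (i : Int) (by positivity) (by exact_mod_cast hin)]
  have hiNat : ((i : Int)).toNat = i := Int.toNat_natCast i
  rw [hiNat]
  have hlen : (cs.take i).length = i := by simp [min_eq_left hin]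
  set r := PySem.Chars.rfind (cs.take i) ['\n'] with hr
  have hrl : r = pvLastNL (cs.take i) i := by rw [hr, pvRfind_eq_lastNL, hlen]
  have hb := pvLastNL_bounds (cs.take i) i
  rw [← hrl] at hb
  have hcollapse : (if r = -1 then (-1 : Int) else r) = r := by split <;> omega
  rw [hcollapse]
  have h0 : 0 ≤ r + 1 := by omega
  rw [PySem.List.slice_toNat cs h0 (by positivity), hiNat]
  have hdt : (cs.drop (r + 1).toNat).take (i - (r + 1).toNat) = (cs.take i).drop ((r + 1).toNat) :=
    (List.drop_take ..).symm
  rw [hdt]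
  have := pvLastNL_drop (cs.take i)
  rw [hlen] at this
  rw [← hrl] at this
  exact this

-- B's 'after' slice is exactly the rest of the line
theorem pvAfter_eq (cs : List Char) (kk : Nat) (hkn : kk ≤ cs.length) :
    PySem.List.slice cs (some (kk : Int))
        (some (if PySem.Chars.findFrom cs ['\n'] (kk : Int) none = -1 then (cs.length : Int)
               else PySem.Chars.findFrom cs ['\n'] (kk : Int) none))
      = (cs.drop kk).takeWhile (· ≠ '\n') := by
  rw [PySem.Chars.findFrom_natCast cs ['\n'] kk hkn]
  set f' := PySem.Chars.find (cs.drop kk) ['\n'] with hf'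
  have hge := PySem.Chars.neg_one_le_find (cs.drop kk) ['\n']
  rw [← hf'] at hge
  by_cases hf : f' = -1
  · simp only [hf, reduceIte]
    rw [PySem.List.slice_toNat cs (by positivity) (by positivity)]
    have h1 : ((kk : Int)).toNat = kk := Int.toNat_natCast kk
    have h2 : (((cs.length : Nat) : Int)).toNat = cs.length := Int.toNat_natCast _
    rw [h1, h2]
    rw [List.take_of_length_le (by simp)]
    have hnin : ('\n') ∉ cs.drop kk := by
      have := (PySem.Chars.find_eq_neg_one_iff (cs.drop kk) ['\n']).mp (by rw [← hf']; exact hf)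
      intro hmem
      exact this ((List.singleton_infix_iff '\n' (cs.drop kk)).mpr hmem)
    exact (List.takeWhile_eq_self_iff.mpr (fun a ha => by
      simp only [decide_eq_true_eq]; intro h; exact hnin (h ▸ ha))).symm
  · have h0f : 0 ≤ f' := by omega
    have hne : ¬ ((kk : Int) + f' = -1) := by omega
    simp only [if_neg hf, if_neg hne]
    rw [PySem.List.slice_toNat cs (by positivity) (by omega)]
    have h1 : ((kk : Int)).toNat = kk := Int.toNat_natCast kk
    have h2 : ((kk : Int) + f').toNat = kk + f'.toNat := by omega
    rw [h1, h2]
    have h3 : kk + f'.toNat - kk = f'.toNat := by omega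
    rw [h3]
    have hspec := PySem.Chars.find_spec (s := cs.drop kk) (sub := ['\n']) (by rw [← hf']; exact h0f)
    rw [← hf'] at hspec
    obtain ⟨hpre, hmin⟩ := hspec
    apply pvTake_eq_takeWhile
    · intro jj hjj c hc
      by_cases hcn : c = '\n'
      · exfalso
        apply hmin jj hjj
        rw [pvSingleton_prefix_iff]
        rw [List.getElem?_drop]
        simpa [hcn] using hc
      · simp [hcn]
    · intro c hc
      rw [pvSingleton_prefix_iff, List.getElem?_drop, Nat.add_zero] at hpre
      rw [hpre] at hc
      cases hc
      simp

-- beyond the end of the text, find returns -1 and the 'after' slice is empty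
theorem pvAfter_eq_big (cs : List Char) (kk : Nat) (hkn : cs.length < kk) :
    PySem.List.slice cs (some (kk : Int))
        (some (if PySem.Chars.findFrom cs ['\n'] (kk : Int) none = -1 then (cs.length : Int)
               else PySem.Chars.findFrom cs ['\n'] (kk : Int) none))
      = (cs.drop kk).takeWhile (· ≠ '\n') := by
  have hff : PySem.Chars.findFrom cs ['\n'] (kk : Int) none = -1 := by
    unfold PySem.Chars.findFrom
    simp only []
    rw [show (if (kk : Int) < 0 then if (kk : Int) + (cs.length : Int) < 0 then 0
          else (kk : Int) + (cs.length : Int) else (kk : Int)) = (kk : Int) from if_neg (by omega)]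
    rw [if_pos (by exact_mod_cast hkn)]
  rw [hff]
  simp only [reduceIte]
  rw [PySem.List.slice_toNat cs (by positivity) (by positivity)]
  rw [Int.toNat_natCast, Int.toNat_natCast]
  rw [List.drop_eq_nil_of_le (by omega)]
  simp

-- ===== VERDICT (by name: the statement is the Claim_ definition above) =====
theorem marker_on_own_line_py_spec : Claim_equal_marker_on_own_line_py := by
  intro text idx m _hdom hpre
  obtain ⟨h1, h2, h3⟩ := hpre
  unfold Spec_marker_on_own_line_py marker_on_own_line_py
  set cs := text.toList with hcs
  have hguard : ¬ (idx < 0 ∨ idx > (cs.length : Int) ∨ idx + m < 0) := by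
    omega
  have hAlt : marker_on_own_line_py_alt text idx m
      = (pvBAllWs (PySem.List.slice cs (some (PySem.Chars.rfindFrom cs ['\n'] 0 (some idx) + 1)) (some idx))
         && pvBAllWs (PySem.List.slice cs (some (idx + m))
              (some (if PySem.Chars.findFrom cs ['\n'] (idx + m) none = -1 then (cs.length : Int)
                     else PySem.Chars.findFrom cs ['\n'] (idx + m) none)))) := by
    unfold marker_on_own_line_py_alt
    rw [if_neg hguard]
  rw [hAlt]
  have hidx : idx = (idx.toNat : Int) := (Int.toNat_of_nonneg h1).symm
  have hsum : idx + m = ((idx + m).toNat : Int) := (Int.toNat_of_nonneg (by omega)).symm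
  set i : Nat := idx.toNat with hi
  set kk : Nat := (idx + m).toNat with hkk
  have hin : i ≤ cs.length := by omega
  rw [hsum, hidx]
  rw [pvALeft_spec cs i hin, pvARight_spec cs kk]
  rw [pvBefore_eq cs i hin]
  have e1 : pvBAllWs (((cs.take i).reverse.takeWhile (· ≠ '\n')).reverse)
      = ((cs.take i).reverse.takeWhile (· ≠ '\n')).all pvAWs := by
    unfold pvBAllWs pvAWs
    rw [List.all_reverse]
  have e2 : pvBAllWs ((cs.drop kk).takeWhile (· ≠ '\n'))
      = ((cs.drop kk).takeWhile (· ≠ '\n')).all pvAWs := rfl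
  by_cases hkn : kk ≤ cs.length
  · rw [pvAfter_eq cs kk hkn, e1, e2]
  · rw [pvAfter_eq_big cs kk (by omega), e1, e2]
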